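-- pv_equiv track=rewrite | github.com/opherdonchin/ynab-il-importer | src/ynab_il_importer/upload_prep.py | _account_lookup
-- ===== SOURCE A (Python) =====
-- from collections import Counter
-- from typing import Any, Mapping
--
-- def _normalize_text(value: Any) -> str:
--     return str(value or "").strip()
--
-- def _account_lookup(
--     accounts: list[dict[str, Any]],
-- ) -> tuple[dict[str, str], dict[str, str]]:
--     active = [acc for acc in accounts if not bool(acc.get("deleted", False))]
--     name_counts = Counter(_normalize_text(acc.get("name", "")) for acc in active)
--     duplicates = sorted(
--         name for name, count in name_counts.items() if name and count > 1
--     )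
--     if duplicates:
--         raise ValueError(f"Duplicate YNAB account names: {duplicates}")
--
--     account_ids = {
--         _normalize_text(acc.get("name", "")): _normalize_text(acc.get("id", ""))
--         for acc in active
--         if _normalize_text(acc.get("name", ""))
--     }
--     transfer_payees = {
--         _normalize_text(acc.get("name", "")): _normalize_text(
--             acc.get("transfer_payee_id", "")
--         )
--         for acc in active
--         if _normalize_text(acc.get("name", ""))
--     }
--     return account_ids, transfer_payees
-- ===== SOURCE B (Python) =====
-- def _account_lookup(accounts):
--     account_ids = {}
--     transfer_payees = {}
--     seen = set()
--     duplicates = set()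
--     for acc in accounts:
--         if bool(acc.get("deleted", False)):
--             continue
--         name = str(acc.get("name", "") or "").strip()
--         if not name:
--             continue
--         if name in seen:
--             duplicates.add(name)
--         else:
--             seen.add(name)
--             account_ids[name] = str(acc.get("id", "") or "").strip()
--             transfer_payees[name] = str(acc.get("transfer_payee_id", "") or "").strip()
--     if duplicates:
--         raise ValueError(f"Duplicate YNAB account names: {sorted(duplicates)}")
--     return account_ids, transfer_payees
-- ===== Notes on version B (the rewrite author's own statement) =====
-- stated objective: alternative
-- what changed: Replaces A's three passes (build a Counter of normalized names, scan its items for duplicates, then two separate dict comprehensions over the active accounts) with a single loop over the accounts that maintains seen/duplicate sets and fills both result dicts as it goes.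
import Mathlib
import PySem

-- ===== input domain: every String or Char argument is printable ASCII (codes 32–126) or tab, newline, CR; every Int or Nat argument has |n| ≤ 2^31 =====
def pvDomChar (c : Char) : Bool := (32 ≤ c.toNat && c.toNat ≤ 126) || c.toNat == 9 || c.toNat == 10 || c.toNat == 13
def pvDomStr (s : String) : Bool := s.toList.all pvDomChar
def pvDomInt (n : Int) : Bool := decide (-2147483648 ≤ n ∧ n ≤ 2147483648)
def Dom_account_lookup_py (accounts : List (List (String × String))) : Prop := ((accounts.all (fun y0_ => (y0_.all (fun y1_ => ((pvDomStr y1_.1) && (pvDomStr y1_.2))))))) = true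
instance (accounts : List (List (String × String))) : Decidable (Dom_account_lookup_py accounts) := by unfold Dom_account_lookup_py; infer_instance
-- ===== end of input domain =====

-- B replaces A's three passes (Counter, then two dict comprehensions) by ONE loop over the
-- accounts maintaining seen/duplicate sets and both dicts; same return value on Pre_ (no
-- duplicate names, where A returns instead of raising); objective: alternative decomposition.

-- ===== PORT A =====
-- acc.get(k, "") on a str→str dict (string default; acc.get("deleted", False) is handled
-- separately below: both the missing-key default and "" are falsy, so the truthiness test agrees)
def pvGet (acc : List (String × String)) (k : String) : String :=
  PySem.Dict.getD (PySem.Dict.mk acc) k ""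

-- _normalize_text: str(value or "") is value itself for a str value unless "", and strip "" = "",
-- so str(value or "").strip() = value.strip() exactly
def normalize_text (value : String) : String := PySem.Str.strip value

-- not bool(acc.get("deleted", False)): missing key → False, a str value → truthy iff nonempty
def pvAlive (acc : List (String × String)) : Bool := !(pvGet acc "deleted" != "")

def account_lookup_py (accounts : List (List (String × String))) :
    (List (String × String)) × (List (String × String)) :=
  let active := accounts.filter pvAlive
  let name_counts := PySem.Dict.counter (active.map (fun acc => normalize_text (pvGet acc "name")))
  let duplicates := PySem.List.sorted
      ((name_counts.items.filter (fun p => p.1 != "" && decide ((1 : Int) < p.2))).map Prod.fst)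
      (fun x => x) false
  if duplicates ≠ [] then ([], [])   -- Python raises ValueError here; excluded by Pre_
  else
    (PySem.Dict.items (active.foldl (fun d acc =>
        if normalize_text (pvGet acc "name") != "" then
          PySem.Dict.insert d (normalize_text (pvGet acc "name")) (normalize_text (pvGet acc "id"))
        else d) PySem.Dict.empty),
     PySem.Dict.items (active.foldl (fun d acc =>
        if normalize_text (pvGet acc "name") != "" then
          PySem.Dict.insert d (normalize_text (pvGet acc "name")) (normalize_text (pvGet acc "transfer_payee_id"))
        else d) PySem.Dict.empty))

-- ===== PORT B =====
-- loop state: (account_ids, transfer_payees, seen, duplicates)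
def pvBState : Type :=
  PySem.Dict String String × PySem.Dict String String × PySem.Set String × PySem.Set String

def pvBStep (st : pvBState) (acc : List (String × String)) : pvBState :=
  if pvGet acc "deleted" != "" then st
  else
    let name := PySem.Str.strip (pvGet acc "name")
    if name == "" then st
    else if PySem.Set.contains st.2.2.1 name then
      (st.1, st.2.1, st.2.2.1, PySem.Set.add st.2.2.2 name)
    else
      (PySem.Dict.insert st.1 name (PySem.Str.strip (pvGet acc "id")),
       PySem.Dict.insert st.2.1 name (PySem.Str.strip (pvGet acc "transfer_payee_id")),
       PySem.Set.add st.2.2.1 name, st.2.2.2)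

def account_lookup_py_alt (accounts : List (List (String × String))) :
    (List (String × String)) × (List (String × String)) :=
  let st := accounts.foldl pvBStep
      (PySem.Dict.empty, PySem.Dict.empty, PySem.Set.empty, PySem.Set.empty)
  if st.2.2.2 ≠ [] then ([], [])    -- Python raises ValueError here; excluded by Pre_
  else (st.1.items, st.2.1.items)

-- ===== PRECONDITION & SPEC =====
-- the normalized names of the non-deleted accounts, empty names dropped
def pvActiveNames (accounts : List (List (String × String))) : List String :=
  ((accounts.filter pvAlive).map (fun acc => normalize_text (pvGet acc "name"))).filter
    (fun n => n != "")

-- Pre_ excludes exactly the inputs with a duplicated nonempty normalized name among the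
-- non-deleted accounts: there Python A raises ValueError (and B raises the same error).
def Pre_account_lookup_py (accounts : List (List (String × String))) : Prop :=
  (pvActiveNames accounts).Nodup
instance (accounts : List (List (String × String))) : Decidable (Pre_account_lookup_py accounts) := by
  unfold Pre_account_lookup_py; infer_instance

def pvWitness_account_lookup_py : (List (List (String × String))) :=
  [[("name", " Checking "), ("id", "a1"), ("transfer_payee_id", "p1")],
   [("name", "Checking"), ("deleted", "x"), ("id", "a2")],
   [("name", "Savings"), ("id", "a3"), ("transfer_payee_id", "p3")],
   [("id", "a4")]]

def Spec_account_lookup_py (accounts : List (List (String × String))) (out : (List (String × String)) × (List (String × String))) : Prop := out = account_lookup_py_alt accounts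
instance (accounts : List (List (String × String))) (out : (List (String × String)) × (List (String × String))) : Decidable (Spec_account_lookup_py accounts out) := by unfold Spec_account_lookup_py; infer_instance

-- ===== CLAIM (what is proved, stated in full; the proofs are below) =====
def Claim_equal_account_lookup_py : Prop := ∀ (accounts : List (List (String × String))), Dom_account_lookup_py accounts → Pre_account_lookup_py accounts → Spec_account_lookup_py accounts (account_lookup_py accounts)

-- ===== LEMMAS AND PROOFS =====

-- A's duplicate pass finds nothing when the active names are distinct
lemma dup_filter_nil (accounts : List (List (String × String)))
    (h : (pvActiveNames accounts).Nodup) :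
    ((PySem.Dict.counter ((accounts.filter pvAlive).map
        (fun acc => normalize_text (pvGet acc "name")))).items.filter
      (fun p => p.1 != "" && decide ((1 : Int) < p.2))).map Prod.fst = [] := by
  unfold pvActiveNames at h
  rw [PySem.Dict.items_counter, List.map_eq_nil_iff, List.filter_eq_nil_iff]
  intro p hp
  simp only [List.mem_map] at hp
  obtain ⟨k, hk, rfl⟩ := hp
  by_cases hke : k = ""
  · simp [hke]
  · have hcnt : List.count k (((accounts.filter pvAlive).map
        (fun acc => normalize_text (pvGet acc "name"))).filter (fun n => n != "")) =
        List.count k ((accounts.filter pvAlive).map (fun acc => normalize_text (pvGet acc "name"))) :=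
      List.count_filter (by simp [hke])
    have hc1 := List.nodup_iff_count_le_one.mp h k
    rw [hcnt] at hc1
    simp only [Bool.and_eq_true, bne_iff_ne, ne_eq, decide_eq_true_eq, not_and, not_lt]
    intro _
    exact_mod_cast Int.ofNat_le.mpr hc1

-- B's single pass, from a seen-set disjoint from the remaining distinct names, computes
-- exactly A's two folds and keeps the duplicate set empty
lemma loopB (accounts : List (List (String × String)))
    (ids payees : PySem.Dict String String) (seen : PySem.Set String)
    (hseen : ∀ n ∈ seen, n ∉ pvActiveNames accounts)
    (hnd : (pvActiveNames accounts).Nodup) :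
    ∃ seen',
      accounts.foldl pvBStep (ids, payees, seen, PySem.Set.empty) =
        ((accounts.filter pvAlive).foldl (fun d acc =>
            if normalize_text (pvGet acc "name") != "" then
              PySem.Dict.insert d (normalize_text (pvGet acc "name")) (normalize_text (pvGet acc "id"))
            else d) ids,
         (accounts.filter pvAlive).foldl (fun d acc =>
            if normalize_text (pvGet acc "name") != "" then
              PySem.Dict.insert d (normalize_text (pvGet acc "name")) (normalize_text (pvGet acc "transfer_payee_id"))
            else d) payees,
         seen', PySem.Set.empty) := by
  unfold pvActiveNames at hseen hnd
  induction accounts generalizing ids payees seen with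
  | nil => exact ⟨seen, rfl⟩
  | cons acc rest ih =>
    by_cases hdead : (pvGet acc "deleted" != "") = true
    · have hA : pvAlive acc = false := by simp [pvAlive, hdead]
      have hstep : pvBStep (ids, payees, seen, PySem.Set.empty) acc =
          (ids, payees, seen, PySem.Set.empty) := by
        simp [pvBStep, hdead]
      simp only [List.foldl_cons, List.filter_cons, hA, if_neg Bool.false_ne_true, hstep]
      refine ih ids payees seen ?_ ?_
      · simpa [List.filter_cons, hA] using hseen
      · simpa [List.filter_cons, hA] using hnd
    · have hA : pvAlive acc = true := by simp [pvAlive] at hdead ⊢; simp [hdead]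
      have hfc : (acc :: rest).filter pvAlive = acc :: rest.filter pvAlive := by
        simp [hA]
      rw [hfc] at hseen hnd
      by_cases hemp : normalize_text (pvGet acc "name") = ""
      · have hcond : (normalize_text (pvGet acc "name") != "") = false := by simp [hemp]
        have hstep : pvBStep (ids, payees, seen, PySem.Set.empty) acc =
            (ids, payees, seen, PySem.Set.empty) := by
          simp only [normalize_text] at hemp
          simp [pvBStep, hdead, hemp]
        rw [List.foldl_cons, hstep, hfc, List.foldl_cons, List.foldl_cons, hcond,
          if_neg Bool.false_ne_true, if_neg Bool.false_ne_true]
        refine ih ids payees seen ?_ ?_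
        · simpa [List.filter_cons, hcond] using hseen
        · simpa [List.filter_cons, hcond] using hnd
      · have hcond : (normalize_text (pvGet acc "name") != "") = true := by simp [hemp]
        have hnames : ((acc :: rest.filter pvAlive).map
              (fun a => normalize_text (pvGet a "name"))).filter (fun m => m != "") =
            normalize_text (pvGet acc "name") ::
              ((rest.filter pvAlive).map (fun a => normalize_text (pvGet a "name"))).filter
                (fun m => m != "") := by
          simp [hcond]
        rw [hnames] at hseen hnd
        by_cases hmem : normalize_text (pvGet acc "name") ∈ seen
        · exact (hseen _ hmem (by simp)).elim
        · have hstep : pvBStep (ids, payees, seen, PySem.Set.empty) acc =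
              (PySem.Dict.insert ids (normalize_text (pvGet acc "name"))
                 (normalize_text (pvGet acc "id")),
               PySem.Dict.insert payees (normalize_text (pvGet acc "name"))
                 (normalize_text (pvGet acc "transfer_payee_id")),
               PySem.Set.add seen (normalize_text (pvGet acc "name")), PySem.Set.empty) := by
            simp only [normalize_text] at hemp hmem ⊢
            simp [pvBStep, hdead, hemp, hmem]
          rw [List.foldl_cons, hstep, hfc, List.foldl_cons, List.foldl_cons, hcond,
            if_pos rfl, if_pos rfl]
          refine ih _ _ _ ?_ (List.nodup_cons.mp hnd).2
          intro n hn
          rcases (PySem.Set.mem_add seen _ n).mp hn with hins | rfl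
          · exact fun hm => hseen n hins (List.mem_cons_of_mem _ hm)
          · exact (List.nodup_cons.mp hnd).1

-- ===== VERDICT (by name: the statement is the Claim_ definition above) =====
theorem account_lookup_py_spec : Claim_equal_account_lookup_py := by
  intro accounts _ hpre
  unfold Spec_account_lookup_py
  unfold Pre_account_lookup_py at hpre
  obtain ⟨seen', hB⟩ := loopB accounts PySem.Dict.empty PySem.Dict.empty PySem.Set.empty
    (by intro n hn; simp [PySem.Set.empty] at hn) hpre
  unfold account_lookup_py account_lookup_py_alt
  simp only [hB, dup_filter_nil accounts hpre]
  simp [PySem.List.sorted, PySem.Set.empty]
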